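-- pv_equiv track=rewrite | github.com/BdR76/CSVLint | extra/generate_colors.py | color_from_degree
-- ===== SOURCE A (Python) =====
-- def color_from_degree(dgr, v_min, v_max):
--
--     # initialise colors
--     while dgr > 360:
--         dgr -= 360
--     while dgr < 0:
--         dgr += 360
--
--     # brighter or darker
--     maxval = v_max - v_min
--
--     # initialise colors
--     rd = 0
--     gr = 0
--     bl = 0
--     if 0.0 <= dgr <= 60.0:
--         # red -> yellow (green=0..255)
--         rd = maxval
--         gr = int( (dgr / 60.0) * maxval)
--     elif 60.0 <= dgr <= 120.0:
--         # yellow -> green (red=255..0)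
--         rd = int( ( (120 - dgr) / 60.0) * maxval)
--         gr = maxval
--     elif 120.0 <= dgr <= 180.0:
--         # green -> cyan (blue=0..255)
--         gr = maxval
--         bl = int( ( (dgr - 120) / 60.0) * maxval)
--     elif 180.0<= dgr <= 240.0:
--         # cyan -> blue (green=255..0)
--         gr = int( ( (240 - dgr) / 60.0) * maxval)
--         bl = maxval
--     elif 240.0 <= dgr <= 300.0:
--         # blue -> purple (red=0..255)
--         rd = int( ( (dgr - 240) / 60.0) * maxval)
--         bl = maxval
--     elif 300.0 <= dgr <= 360.0:
--         # purple -> red (blue=255..0)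
--         rd = maxval
--         bl = int( ( (360 - dgr) / 60.0) * maxval)
--
--     # incase brighter
--     rd = v_min + rd
--     gr = v_min + gr
--     bl = v_min + bl
--
--     # built color, note order is blue, green, red (not RGB)
--     retval = (bl * 256 * 256) +  (gr * 256) + rd
--
--     return retval
-- ===== SOURCE B (Python) =====
-- def color_from_degree(dgr, v_min, v_max):
--     # O(1) normalization into the same range A's one-step-at-a-time loops reach
--     if dgr > 360:
--         dgr = (dgr - 1) % 360 + 1
--     elif dgr < 0:
--         dgr %= 360
--
--     maxval = v_max - v_min
--
--     def level(n):
--         # clamp the triangle-wave argument to [0, 60], then scale like A does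
--         n = 0 if n < 0 else (60 if n > 60 else n)
--         return v_min + int((n / 60.0) * maxval)
--
--     # each channel is one symmetric triangle wave of the hue: no sector branching
--     rd = level(abs(dgr - 180) - 60)
--     gr = level(120 - abs(dgr - 120))
--     bl = level(120 - abs(dgr - 240))
--
--     return bl * 65536 + gr * 256 + rd
-- ===== Notes on version B (the rewrite author's own statement) =====
-- stated objective: faster
-- what changed: B computes each channel independently as a clamped symmetric triangle wave of the hue (level(|d-c|-based formula) per channel), eliminating A's six-sector if/elif dispatch entirely, and replaces A's one-360-step-at-a-time while-loop normalization by O(1) modular arithmetic.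
import Mathlib
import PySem

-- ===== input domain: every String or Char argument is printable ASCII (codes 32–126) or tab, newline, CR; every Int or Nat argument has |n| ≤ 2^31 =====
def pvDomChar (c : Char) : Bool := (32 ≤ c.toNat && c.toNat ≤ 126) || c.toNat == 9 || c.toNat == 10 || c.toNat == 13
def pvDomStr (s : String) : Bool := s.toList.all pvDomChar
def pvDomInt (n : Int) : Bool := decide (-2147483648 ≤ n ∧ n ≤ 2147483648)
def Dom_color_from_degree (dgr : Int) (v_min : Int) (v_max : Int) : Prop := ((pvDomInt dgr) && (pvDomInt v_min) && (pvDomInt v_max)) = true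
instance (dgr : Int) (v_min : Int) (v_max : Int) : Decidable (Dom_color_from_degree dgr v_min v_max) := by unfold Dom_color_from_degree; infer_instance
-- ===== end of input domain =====

-- B drops A's six-sector if/elif dispatch: each channel is one clamped triangle wave of the
-- hue, and the step-by-step normalization loops become O(1) modular arithmetic (faster on large |dgr|).

-- ===== PORT A =====
-- A-side helpers: the `while` normalization loops, and an EXACT model of the Python float
-- expression `int((n/60.0)*maxval)` used verbatim by both sources.

-- `while dgr > 360: dgr -= 360`
def pvNormUp (d : Int) : Int :=
  if 360 < d then pvNormUp (d - 360) else d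
termination_by d.toNat
decreasing_by omega

-- `while dgr < 0: dgr += 360`
def pvNormDown (d : Int) : Int :=
  if d < 0 then pvNormDown (d + 360) else d
termination_by (-d).toNat
decreasing_by omega

-- round-half-to-even of a/b (a ≥ 0, b > 0): IEEE-754 nearest rounding of the quotient's mantissa
def pvRhe (a b : Int) : Int :=
  let q := a / b
  let r := a % b
  if 2 * r < b then q else if b < 2 * r then q + 1 else if q % 2 = 0 then q else q + 1

-- binary exponent e of a/b (a ≥ b > 0 in our uses): largest e with 2^e ≤ a/b
def pvRpExp (a b : Int) : Int :=
  let d : Int := (PySem.Int.bitLength a : Int) - (PySem.Int.bitLength b : Int)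
  if (if 0 ≤ d then b * 2 ^ d.toNat ≤ a else b ≤ a * 2 ^ (-d).toNat) then d else d - 1

-- round positive rational a/b to the nearest double (53-bit significand, round half to even),
-- returned exactly as a dyadic rational (num, j) of value num / 2^j.  Exact: no overflow/underflow
-- occurs for the magnitudes reachable on Dom.
def pvRoundPos (a b : Int) : Int × Nat :=
  let e := pvRpExp a b
  if 0 ≤ 52 - e then (pvRhe (a * 2 ^ (52 - e).toNat) b, (52 - e).toNat)
  else (pvRhe a (b * 2 ^ (e - 52).toNat) * 2 ^ (e - 52).toNat, 0)

-- EXACT model of Python `int((n/60.0)*m)` for 0 ≤ n ≤ 60 and |m| ≤ 2^53 (the only uses):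
-- n/60.0 is one IEEE rounding, the int m converts to float exactly (|m| < 2^53), the product is one
-- IEEE rounding, int() truncates toward zero.
def pvTruncMulDiv60 (n m : Int) : Int :=
  if n = 0 ∨ m = 0 then 0
  else
    let pk := pvRoundPos n 60
    let qj := pvRoundPos (pk.1 * (m.natAbs : Int)) ((2 : Int) ^ pk.2)
    (if m < 0 then -1 else 1) * (qj.1 / (2 : Int) ^ qj.2)

def color_from_degree (dgr : Int) (v_min : Int) (v_max : Int) : Int :=
  let d := pvNormDown (pvNormUp dgr)
  let maxval := v_max - v_min
  let rgb : Int × Int × Int :=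
    if 0 ≤ d ∧ d ≤ 60 then (maxval, pvTruncMulDiv60 d maxval, 0)
    else if 60 ≤ d ∧ d ≤ 120 then (pvTruncMulDiv60 (120 - d) maxval, maxval, 0)
    else if 120 ≤ d ∧ d ≤ 180 then (0, maxval, pvTruncMulDiv60 (d - 120) maxval)
    else if 180 ≤ d ∧ d ≤ 240 then (0, pvTruncMulDiv60 (240 - d) maxval, maxval)
    else if 240 ≤ d ∧ d ≤ 300 then (pvTruncMulDiv60 (d - 240) maxval, 0, maxval)
    else if 300 ≤ d ∧ d ≤ 360 then (maxval, 0, pvTruncMulDiv60 (360 - d) maxval)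
    else (0, 0, 0)
  let rd := v_min + rgb.1
  let gr := v_min + rgb.2.1
  let bl := v_min + rgb.2.2
  bl * 256 * 256 + gr * 256 + rd

-- ===== PORT B =====
-- Source B's nested `level(n)`: clamp to [0,60], scale by the same float formula, shift by v_min
def pvLevel (v_min maxv n : Int) : Int :=
  v_min + pvTruncMulDiv60 (if n < 0 then 0 else if 60 < n then 60 else n) maxv

def color_from_degree_alt (dgr : Int) (v_min : Int) (v_max : Int) : Int :=
  let d := if 360 < dgr then PySem.Int.mod (dgr - 1) 360 + 1
           else if dgr < 0 then PySem.Int.mod dgr 360 else dgr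
  let maxval := v_max - v_min
  let rd := pvLevel v_min maxval (|d - 180| - 60)
  let gr := pvLevel v_min maxval (120 - |d - 120|)
  let bl := pvLevel v_min maxval (120 - |d - 240|)
  bl * 65536 + gr * 256 + rd

-- ===== PRECONDITION & SPEC =====
def Spec_color_from_degree (dgr : Int) (v_min : Int) (v_max : Int) (out : Int) : Prop := out = color_from_degree_alt dgr v_min v_max
instance (dgr : Int) (v_min : Int) (v_max : Int) (out : Int) : Decidable (Spec_color_from_degree dgr v_min v_max out) := by unfold Spec_color_from_degree; infer_instance

-- ===== CLAIM (what is proved, stated in full; the proofs are below) =====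
def Claim_equal_color_from_degree : Prop := ∀ (dgr : Int) (v_min : Int) (v_max : Int), Dom_color_from_degree dgr v_min v_max → Spec_color_from_degree dgr v_min v_max (color_from_degree dgr v_min v_max)

-- ===== LEMMAS AND PROOFS =====

theorem pvNormUp_le (d : Int) : pvNormUp d ≤ 360 := by
  fun_induction pvNormUp d with
  | case1 d h ih => exact ih
  | case2 d h => omega

theorem pvNormUp_pos (d : Int) (h : 0 < d) : pvNormUp d = (d - 1) % 360 + 1 := by
  fun_induction pvNormUp d with
  | case1 d h' ih => rw [ih (by omega)]; omega
  | case2 d h' => omega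

theorem pvNormDown_neg (d : Int) (h : d < 0) : pvNormDown d = d % 360 := by
  fun_induction pvNormDown d with
  | case1 d h' ih =>
      by_cases h2 : d + 360 < 0
      · rw [ih h2]; omega
      · unfold pvNormDown at ih ⊢
        simp [h2] at ih ⊢
        omega
  | case2 d h' => omega

theorem pvNorm_closed (dgr : Int) :
    (if 360 < dgr then PySem.Int.mod (dgr - 1) 360 + 1
     else if dgr < 0 then PySem.Int.mod dgr 360 else dgr) = pvNormDown (pvNormUp dgr) := by
  rw [PySem.Int.mod_eq_emod_of_pos (by norm_num : (0:Int) < 360), PySem.Int.mod_eq_emod_of_pos (by norm_num : (0:Int) < 360)]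
  by_cases h1 : 360 < dgr
  · have hu := pvNormUp_pos dgr (by omega)
    have : 0 ≤ pvNormUp dgr := by rw [hu]; omega
    rw [if_pos h1]
    unfold pvNormDown
    rw [if_neg (by omega), hu]
  · rw [if_neg h1]
    by_cases h2 : dgr < 0
    · rw [if_pos h2]
      have : pvNormUp dgr = dgr := by unfold pvNormUp; rw [if_neg (by omega)]
      rw [this, pvNormDown_neg dgr h2]
    · rw [if_neg h2]
      by_cases h3 : 0 < dgr
      · have hu := pvNormUp_pos dgr h3
        unfold pvNormDown; rw [hu, if_neg (by omega)]; omega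
      · have hu : pvNormUp dgr = dgr := by unfold pvNormUp; rw [if_neg (by omega)]
        unfold pvNormDown; rw [hu, if_neg (by omega)]

theorem pvNormDown_nonneg (d : Int) : 0 ≤ pvNormDown d := by
  fun_induction pvNormDown d with
  | case1 d h ih => exact ih
  | case2 d h => omega

theorem pvNormDown_le_max (d : Int) : pvNormDown d ≤ max d 360 := by
  fun_induction pvNormDown d with
  | case1 d h ih => omega
  | case2 d h => omega

theorem pvNorm_bounds (dgr : Int) : 0 ≤ pvNormDown (pvNormUp dgr) ∧ pvNormDown (pvNormUp dgr) ≤ 360 := by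
  have h1 := pvNormUp_le dgr
  have h2 := pvNormDown_nonneg (pvNormUp dgr)
  have h3 := pvNormDown_le_max (pvNormUp dgr)
  omega

theorem pvRhe_of_dvd (a b : Int) (hb : 0 < b) (h : b ∣ a) : pvRhe a b = a / b := by
  unfold pvRhe
  have hr : a % b = 0 := Int.emod_eq_zero_of_dvd h
  simp [hr]
  omega

theorem pvRpExp_bounds (a b : Int) (hb : 0 < b) (hba : b ≤ a) :
    0 ≤ pvRpExp a b ∧ 2 ^ (pvRpExp a b).toNat * b ≤ a := by
  simp only [pvRpExp]
  have ha : 0 < a := lt_of_lt_of_le hb hba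
  have haU : a.natAbs < 2 ^ PySem.Int.bitLength a := PySem.Int.lt_two_pow_bitLength a
  have haL : 2 ^ (PySem.Int.bitLength a - 1) ≤ a.natAbs := PySem.Int.two_pow_bitLength_le a (by omega)
  have hbU : b.natAbs < 2 ^ PySem.Int.bitLength b := PySem.Int.lt_two_pow_bitLength b
  have hbL : 2 ^ (PySem.Int.bitLength b - 1) ≤ b.natAbs := PySem.Int.two_pow_bitLength_le b (by omega)
  set La := PySem.Int.bitLength a with hLa
  set Lb := PySem.Int.bitLength b with hLb
  have hab : b.natAbs ≤ a.natAbs := by omega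
  have hmono : Lb ≤ La := by
    by_contra hc
    rw [not_le] at hc
    have hp : (2:ℕ) ^ La ≤ 2 ^ (Lb - 1) := Nat.pow_le_pow_right (by norm_num) (by omega)
    have : a.natAbs < a.natAbs := lt_of_lt_of_le haU (le_trans hp (le_trans hbL hab))
    omega
  have hd0 : (0:Int) ≤ (La:Int) - (Lb:Int) := by omega
  simp only [if_pos hd0]
  by_cases hcond : b * 2 ^ ((La:Int) - (Lb:Int)).toNat ≤ a
  · rw [if_pos hcond]
    exact ⟨hd0, by rw [mul_comm]; exact hcond⟩
  · rw [if_neg hcond]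
    have hd1 : 1 ≤ (La:Int) - (Lb:Int) := by
      rcases eq_or_lt_of_le hd0 with h | h
      · exfalso; apply hcond
        have h0 : ((La:Int) - (Lb:Int)).toNat = 0 := by omega
        rw [h0]; simpa using hba
      · omega
    refine ⟨by omega, ?_⟩
    have hLab : Lb + 1 ≤ La := by omega
    have hLb1 : 1 ≤ Lb := by
      by_contra hc
      have h0 : Lb = 0 := by omega
      rw [h0] at hbU
      simp at hbU
      omega
    have key : b.natAbs * 2 ^ (La - Lb - 1) ≤ a.natAbs := by
      have hp1 : b.natAbs * 2 ^ (La - Lb - 1) < 2 ^ Lb * 2 ^ (La - Lb - 1) :=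
        Nat.mul_lt_mul_of_lt_of_le hbU (le_refl _) (Nat.two_pow_pos _)
      have hp2 : (2:ℕ) ^ Lb * 2 ^ (La - Lb - 1) = 2 ^ (La - 1) := by
        rw [← pow_add]; congr 1; omega
      calc b.natAbs * 2 ^ (La - Lb - 1) ≤ 2 ^ Lb * 2 ^ (La - Lb - 1) := le_of_lt hp1
        _ = 2 ^ (La - 1) := hp2
        _ ≤ a.natAbs := haL
    have key' : (b.natAbs : Int) * 2 ^ (La - Lb - 1) ≤ (a.natAbs : Int) := by exact_mod_cast key
    rw [Int.natAbs_of_nonneg hb.le, Int.natAbs_of_nonneg ha.le] at key'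
    have htn : ((La:Int) - (Lb:Int) - 1).toNat = La - Lb - 1 := by omega
    rw [htn, mul_comm]
    exact key'

theorem pvRoundPos_exact (V b : Int) (hb : 0 < b) (hV : 0 < V) (hV2 : V ≤ 2 ^ 52) :
    (pvRoundPos (V * b) b).1 = V * 2 ^ (pvRoundPos (V * b) b).2 := by
  obtain ⟨he0, hle⟩ := pvRpExp_bounds (V * b) b hb (le_mul_of_one_le_left hb.le hV)
  unfold pvRoundPos
  set e := pvRpExp (V * b) b with hE
  have heV : (2:Int) ^ e.toNat ≤ V := le_of_mul_le_mul_right hle hb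
  have he52 : e ≤ 52 := by
    by_contra hc
    rw [not_le] at hc
    have h53 : (2:Int) ^ 53 ≤ 2 ^ e.toNat := pow_le_pow_right₀ (by norm_num) (by omega)
    have : (2:Int) ^ 52 < 2 ^ 53 := by norm_num
    linarith
  rw [if_pos (by omega : (0:Int) ≤ 52 - e)]
  have hdvd : b ∣ V * b * 2 ^ ((52:Int) - e).toNat := ⟨V * 2 ^ ((52:Int) - e).toNat, by ring⟩
  simp only
  rw [pvRhe_of_dvd _ _ hb hdvd]
  rw [show V * b * 2 ^ ((52:Int) - e).toNat = V * 2 ^ ((52:Int) - e).toNat * b by ring,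
     Int.mul_ediv_cancel _ (ne_of_gt hb)]

theorem pvHelper_zero (m : Int) : pvTruncMulDiv60 0 m = 0 := by
  simp [pvTruncMulDiv60]

theorem pvHelper_sixty (m : Int) (hm : m.natAbs ≤ 2 ^ 52) : pvTruncMulDiv60 60 m = m := by
  by_cases hm0 : m = 0
  · simp [hm0, pvTruncMulDiv60]
  unfold pvTruncMulDiv60
  rw [if_neg (by simp [hm0])]
  have h6060 : pvRoundPos 60 60 = (4503599627370496, 52) := by decide
  simp only [h6060]
  have hV : (0:Int) < (m.natAbs : Int) := by omega
  have hV2 : (m.natAbs : Int) ≤ 2 ^ 52 := by exact_mod_cast hm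
  have hkey := pvRoundPos_exact (m.natAbs : Int) ((2:Int) ^ 52) (by positivity) hV hV2
  rw [show (4503599627370496 : Int) * (m.natAbs : Int) = (m.natAbs : Int) * (2:Int) ^ 52 by
        rw [mul_comm]; norm_num]
  rw [hkey, Int.mul_ediv_cancel _ (by positivity)]
  rcases lt_trichotomy m 0 with h | h | h
  · rw [if_pos h]; omega
  · exact absurd h hm0
  · rw [if_neg (by omega)]; omega

-- rewrite Source B's `level` to its clamped value
theorem pvLevel_clamp (v maxv n m : Int)
    (h : (if n < 0 then (0:Int) else if 60 < n then 60 else n) = m) :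
    pvLevel v maxv n = v + pvTruncMulDiv60 m maxv := by
  unfold pvLevel; rw [h]

-- ===== VERDICT (by name: the statement is the Claim_ definition above) =====
theorem color_from_degree_spec : Claim_equal_color_from_degree := by
  intro dgr v_min v_max hdom
  unfold Spec_color_from_degree
  have hmabs : (v_max - v_min).natAbs ≤ 2 ^ 52 := by
    unfold Dom_color_from_degree pvDomInt at hdom
    simp only [Bool.and_eq_true, decide_eq_true_eq] at hdom
    omega
  have hbnd := pvNorm_bounds dgr
  have h60 := pvHelper_sixty (v_max - v_min) hmabs
  have h0 := pvHelper_zero (v_max - v_min)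
  simp only [color_from_degree, color_from_degree_alt]
  rw [pvNorm_closed dgr]
  set d := pvNormDown (pvNormUp dgr) with hd
  obtain ⟨hb0, hb1⟩ := hbnd
  by_cases c1 : d ≤ 60
  · have ha1 : |d - 180| = 180 - d := by rw [abs_of_nonpos (by omega)]; ring
    have ha2 : |d - 120| = 120 - d := by rw [abs_of_nonpos (by omega)]; ring
    have ha3 : |d - 240| = 240 - d := by rw [abs_of_nonpos (by omega)]; ring
    rw [if_pos (show 0 ≤ d ∧ d ≤ 60 by omega), ha1, ha2, ha3,
        pvLevel_clamp v_min (v_max - v_min) (120 - (240 - d)) (0) (by split_ifs <;> omega),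
        pvLevel_clamp v_min (v_max - v_min) (120 - (120 - d)) (d) (by split_ifs <;> omega),
        pvLevel_clamp v_min (v_max - v_min) (180 - d - 60) (60) (by split_ifs <;> omega),
        h60, h0]
    norm_num
    try ring
  by_cases c2 : d ≤ 120
  · have ha1 : |d - 180| = 180 - d := by rw [abs_of_nonpos (by omega)]; ring
    have ha2 : |d - 120| = 120 - d := by rw [abs_of_nonpos (by omega)]; ring
    have ha3 : |d - 240| = 240 - d := by rw [abs_of_nonpos (by omega)]; ring
    rw [if_neg (by omega), if_pos (show 60 ≤ d ∧ d ≤ 120 by omega), ha1, ha2, ha3,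
        pvLevel_clamp v_min (v_max - v_min) (120 - (240 - d)) (0) (by split_ifs <;> omega),
        pvLevel_clamp v_min (v_max - v_min) (120 - (120 - d)) (60) (by split_ifs <;> omega),
        pvLevel_clamp v_min (v_max - v_min) (180 - d - 60) (120 - d) (by split_ifs <;> omega),
        h60, h0]
    norm_num
    try ring
  by_cases c3 : d ≤ 180
  · have ha1 : |d - 180| = 180 - d := by rw [abs_of_nonpos (by omega)]; ring
    have ha2 : |d - 120| = d - 120 := by rw [abs_of_nonneg (by omega)]
    have ha3 : |d - 240| = 240 - d := by rw [abs_of_nonpos (by omega)]; ring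
    rw [if_neg (by omega), if_neg (by omega), if_pos (show 120 ≤ d ∧ d ≤ 180 by omega), ha1, ha2, ha3,
        pvLevel_clamp v_min (v_max - v_min) (120 - (240 - d)) (d - 120) (by split_ifs <;> omega),
        pvLevel_clamp v_min (v_max - v_min) (120 - (d - 120)) (60) (by split_ifs <;> omega),
        pvLevel_clamp v_min (v_max - v_min) (180 - d - 60) (0) (by split_ifs <;> omega),
        h60, h0]
    norm_num
    try ring
  by_cases c4 : d ≤ 240
  · have ha1 : |d - 180| = d - 180 := by rw [abs_of_nonneg (by omega)]
    have ha2 : |d - 120| = d - 120 := by rw [abs_of_nonneg (by omega)]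
    have ha3 : |d - 240| = 240 - d := by rw [abs_of_nonpos (by omega)]; ring
    rw [if_neg (by omega), if_neg (by omega), if_neg (by omega), if_pos (show 180 ≤ d ∧ d ≤ 240 by omega), ha1, ha2, ha3,
        pvLevel_clamp v_min (v_max - v_min) (120 - (240 - d)) (60) (by split_ifs <;> omega),
        pvLevel_clamp v_min (v_max - v_min) (120 - (d - 120)) (240 - d) (by split_ifs <;> omega),
        pvLevel_clamp v_min (v_max - v_min) (d - 180 - 60) (0) (by split_ifs <;> omega),
        h60, h0]
    norm_num
    try ring
  by_cases c5 : d ≤ 300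
  · have ha1 : |d - 180| = d - 180 := by rw [abs_of_nonneg (by omega)]
    have ha2 : |d - 120| = d - 120 := by rw [abs_of_nonneg (by omega)]
    have ha3 : |d - 240| = d - 240 := by rw [abs_of_nonneg (by omega)]
    rw [if_neg (by omega), if_neg (by omega), if_neg (by omega), if_neg (by omega), if_pos (show 240 ≤ d ∧ d ≤ 300 by omega), ha1, ha2, ha3,
        pvLevel_clamp v_min (v_max - v_min) (120 - (d - 240)) (60) (by split_ifs <;> omega),
        pvLevel_clamp v_min (v_max - v_min) (120 - (d - 120)) (0) (by split_ifs <;> omega),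
        pvLevel_clamp v_min (v_max - v_min) (d - 180 - 60) (d - 240) (by split_ifs <;> omega),
        h60, h0]
    norm_num
    try ring
  · have ha1 : |d - 180| = d - 180 := by rw [abs_of_nonneg (by omega)]
    have ha2 : |d - 120| = d - 120 := by rw [abs_of_nonneg (by omega)]
    have ha3 : |d - 240| = d - 240 := by rw [abs_of_nonneg (by omega)]
    rw [if_neg (by omega), if_neg (by omega), if_neg (by omega), if_neg (by omega), if_neg (by omega), if_pos (show 300 ≤ d ∧ d ≤ 360 by omega), ha1, ha2, ha3,
        pvLevel_clamp v_min (v_max - v_min) (120 - (d - 240)) (360 - d) (by split_ifs <;> omega),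
        pvLevel_clamp v_min (v_max - v_min) (120 - (d - 120)) (0) (by split_ifs <;> omega),
        pvLevel_clamp v_min (v_max - v_min) (d - 180 - 60) (60) (by split_ifs <;> omega),
        h60, h0]
    norm_num
    try ring
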